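-- pv_equiv track=rewrite | github.com/CharanKrishna04/Mrnd-PythonCourse | builtins/base5.py | from_custom_base5
-- ===== SOURCE A (Python) =====
-- def from_custom_base5(s):
--     l=len(s)
--     res=0
--     for i in s:
--         l=l-1
--         n=ord(i)-ord('a')
--         res+= n*(5**l)
--
--
--     return res
-- ===== SOURCE B (Python) =====
-- def from_custom_base5(s):
--     res = 0
--     for c in s:
--         res = res * 5 + (ord(c) - ord('a'))
--     return res
-- ===== Notes on version B (the rewrite author's own statement) =====
-- stated objective: faster
-- what changed: Replaces per-digit power computation res += n*5**l (recomputing a big power each step) with Horner's rule res = res*5 + n in one left fold.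
import Mathlib
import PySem

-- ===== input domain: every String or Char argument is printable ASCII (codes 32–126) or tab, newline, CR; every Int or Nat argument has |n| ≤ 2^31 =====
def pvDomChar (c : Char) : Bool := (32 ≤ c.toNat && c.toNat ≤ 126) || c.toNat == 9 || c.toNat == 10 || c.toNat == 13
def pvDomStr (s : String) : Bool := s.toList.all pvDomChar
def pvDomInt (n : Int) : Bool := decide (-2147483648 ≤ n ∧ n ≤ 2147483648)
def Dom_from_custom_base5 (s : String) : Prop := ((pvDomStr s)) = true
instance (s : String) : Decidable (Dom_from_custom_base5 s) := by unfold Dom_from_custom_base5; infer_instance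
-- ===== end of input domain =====

-- Header: B replaces A's per-digit power 5**l with Horner's rule (res = res*5 + digit); proved equal on all strings.


-- ===== PORT A =====
-- Loop state of A: l (remaining exponent counter) and res. l starts at len(s) and is
-- decremented once per character, so it stays ≥ 0 and Nat is exact for Python's 5**l here.
def fromBase5GoA : List Char → Nat → Int → Int
  | [], _, res => res
  | c :: cs, l, res => fromBase5GoA cs (l - 1) (res + ((c.toNat : Int) - 97) * (5 : Int) ^ (l - 1))

def from_custom_base5 (s : String) : Int :=
  fromBase5GoA s.toList s.toList.length 0

-- ===== PORT B =====
def from_custom_base5_alt (s : String) : Int :=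
  s.toList.foldl (fun res c => res * 5 + ((c.toNat : Int) - 97)) 0

-- ===== PRECONDITION & SPEC =====
def Spec_from_custom_base5 (s : String) (out : Int) : Prop := out = from_custom_base5_alt s
instance (s : String) (out : Int) : Decidable (Spec_from_custom_base5 s out) := by unfold Spec_from_custom_base5; infer_instance

-- ===== CLAIM (what is proved, stated in full; the proofs are below) =====
def Claim_equal_from_custom_base5 : Prop := ∀ (s : String), Dom_from_custom_base5 s → Spec_from_custom_base5 s (from_custom_base5 s)

-- ===== LEMMAS AND PROOFS =====
theorem horner_shift (cs : List Char) : ∀ (r : Int),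
    cs.foldl (fun res c => res * 5 + ((c.toNat : Int) - 97)) r
      = r * (5 : Int) ^ cs.length + cs.foldl (fun res c => res * 5 + ((c.toNat : Int) - 97)) 0 := by
  induction cs with
  | nil => intro r; simp
  | cons c cs ih =>
    intro r
    simp only [List.foldl_cons, List.length_cons]
    rw [ih (r * 5 + ((c.toNat : Int) - 97)), ih (0 * 5 + ((c.toNat : Int) - 97))]
    ring

theorem goA_eq_horner (cs : List Char) : ∀ (res : Int),
    fromBase5GoA cs cs.length res
      = res + cs.foldl (fun res c => res * 5 + ((c.toNat : Int) - 97)) 0 := by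
  induction cs with
  | nil => intro res; simp [fromBase5GoA]
  | cons c cs ih =>
    intro res
    simp only [fromBase5GoA, List.length_cons, Nat.add_sub_cancel, List.foldl_cons]
    rw [ih, horner_shift cs (0 * 5 + ((c.toNat : Int) - 97))]
    ring

-- ===== VERDICT (by name: the statement is the Claim_ definition above) =====
theorem from_custom_base5_spec : Claim_equal_from_custom_base5 := by
  intro s _
  show from_custom_base5 s = from_custom_base5_alt s
  unfold from_custom_base5 from_custom_base5_alt
  rw [goA_eq_horner]
  simp
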